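-- pv_equiv track=rewrite | github.com/jduncan8142/AOC-2025 | puzzles/day12.py | get_all_orientations
-- ===== SOURCE A (Python) =====
-- def get_shape_coords(shape):
--     """Get list of (row, col) coordinates where shape has '#'."""
--     coords = []
--     for r, row in enumerate(shape):
--         for c, cell in enumerate(row):
--             if cell == '#':
--                 coords.append((r, c))
--     return coords
--
-- def normalize_coords(coords):
--     """Normalize coordinates to start at (0, 0)."""
--     if not coords:
--         return []
--     min_r = min(r for r, c in coords)
--     min_c = min(c for r, c in coords)
--     return sorted([(r - min_r, c - min_c) for r, c in coords])
--
-- def rotate_90(coords):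
--     """Rotate coordinates 90 degrees clockwise."""
--     return normalize_coords([(c, -r) for r, c in coords])
--
-- def flip_horizontal(coords):
--     """Flip coordinates horizontally."""
--     return normalize_coords([(r, -c) for r, c in coords])
--
-- def get_all_orientations(shape):
--     """Get all unique orientations (rotations and flips) of a shape."""
--     coords = get_shape_coords(shape)
--     coords = normalize_coords(coords)
--
--     orientations = set()
--     current = coords
--
--     # Try all 4 rotations
--     for _ in range(4):
--         orientations.add(tuple(current))
--         current = rotate_90(current)
--
--     # Flip and try all 4 rotations
--     current = flip_horizontal(coords)
--     for _ in range(4):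
--         orientations.add(tuple(current))
--         current = rotate_90(current)
--
--     return [list(o) for o in orientations]
-- ===== SOURCE B (Python) =====
-- def _normalize(coords):
--     """Translate coords so the minima hit (0, 0), and sort."""
--     if not coords:
--         return []
--     mr = min(r for r, c in coords)
--     mc = min(c for r, c in coords)
--     return sorted((r - mr, c - mc) for r, c in coords)
--
--
-- # The 8 dihedral transforms, in the order A discovers them:
-- # id, rot90, rot180, rot270, flip, flip+rot90, flip+rot180, flip+rot270.
-- _TRANSFORMS = [
--     lambda r, c: (r, c),
--     lambda r, c: (c, -r),
--     lambda r, c: (-r, -c),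
--     lambda r, c: (-c, r),
--     lambda r, c: (r, -c),
--     lambda r, c: (-c, -r),
--     lambda r, c: (-r, c),
--     lambda r, c: (c, r),
-- ]
--
--
-- def get_all_orientations(shape):
--     """Get all unique orientations (rotations and flips) of a shape."""
--     base = _normalize([(r, c)
--                        for r, row in enumerate(shape)
--                        for c, cell in enumerate(row) if cell == '#'])
--     orientations = set()
--     for t in _TRANSFORMS:
--         orientations.add(tuple(_normalize([t(r, c) for r, c in base])))
--     return [list(o) for o in orientations]
-- ===== Notes on version B (the rewrite author's own statement) =====
-- stated objective: alternative
-- what changed: B replaces A's iterative accumulator threading (rotate the previous result four times, then flip and rotate again) by eight independent closed-form dihedral coordinate maps applied once each to one normalized base coordinate list.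
import Mathlib
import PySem

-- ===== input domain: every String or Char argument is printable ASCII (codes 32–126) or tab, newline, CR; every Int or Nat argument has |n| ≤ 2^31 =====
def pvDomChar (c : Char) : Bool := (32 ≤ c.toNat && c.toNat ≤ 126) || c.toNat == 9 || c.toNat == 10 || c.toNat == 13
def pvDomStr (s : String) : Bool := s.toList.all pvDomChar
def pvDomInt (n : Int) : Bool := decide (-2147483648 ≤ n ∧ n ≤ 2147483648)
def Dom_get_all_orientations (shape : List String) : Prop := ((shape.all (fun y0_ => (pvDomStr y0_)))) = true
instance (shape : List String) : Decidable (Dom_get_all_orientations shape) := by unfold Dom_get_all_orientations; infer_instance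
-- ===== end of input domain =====

-- B replaces A's iterative 'rotate the previous orientation' accumulator by eight independent
-- closed-form dihedral transforms of one normalized base; same cost ('alternative', not faster).

-- ===== PORT A =====
-- get_shape_coords: nested enumerate loops appending '#' cells
def get_shape_coords (shape : List String) : List (Int × Int) :=
  (PySem.List.enumerate shape).foldl
    (fun coords rc =>
      (PySem.List.enumerate rc.2.toList).foldl
        (fun coords cc => if cc.2 == '#' then coords ++ [(rc.1, cc.1)] else coords)
        coords)
    []

-- normalize_coords: min is only taken in the nonempty branch, so `min?` is `some`; getD 0 is unreachable
def normalize_coords (coords : List (Int × Int)) : List (Int × Int) :=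
  if coords = [] then []
  else
    let min_r := (PySem.List.min? (coords.map (fun p => p.1)) (fun x => x)).getD 0
    let min_c := (PySem.List.min? (coords.map (fun p => p.2)) (fun x => x)).getD 0
    -- sorted on int pairs = Python's lexicographic tuple sort = sorted2 on the two components
    PySem.List.sorted2 (coords.map (fun p => (p.1 - min_r, p.2 - min_c)))
      (fun p => p.1) (fun p => p.2) false

def rotate_90 (coords : List (Int × Int)) : List (Int × Int) :=
  normalize_coords (coords.map (fun p => (p.2, -p.1)))

def flip_horizontal (coords : List (Int × Int)) : List (Int × Int) :=
  normalize_coords (coords.map (fun p => (p.1, -p.2)))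

-- the two 4-rotation loops thread (orientations-set, current) through range(4)
def get_all_orientations (shape : List String) : List (List (Int × Int)) :=
  let coords := normalize_coords (get_shape_coords shape)
  let r1 := (PySem.List.pyRange 0 4 1).foldl
    (fun (st : PySem.Set (List (Int × Int)) × List (Int × Int)) _ =>
      (PySem.Set.add st.1 st.2, rotate_90 st.2))
    (PySem.Set.empty, coords)
  let r2 := (PySem.List.pyRange 0 4 1).foldl
    (fun (st : PySem.Set (List (Int × Int)) × List (Int × Int)) _ =>
      (PySem.Set.add st.1 st.2, rotate_90 st.2))
    (r1.1, flip_horizontal coords)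
  -- [list(o) for o in orientations]: the set's distinct elements (output compared as a set)
  r2.1

-- ===== PORT B =====
-- Source B _normalize (same text as A's normalize_coords; B keeps its own helper)
def pyB_normalize (coords : List (Int × Int)) : List (Int × Int) :=
  if coords = [] then []
  else
    let mr := (PySem.List.min? (coords.map (fun p => p.1)) (fun x => x)).getD 0
    let mc := (PySem.List.min? (coords.map (fun p => p.2)) (fun x => x)).getD 0
    PySem.List.sorted2 (coords.map (fun p => (p.1 - mr, p.2 - mc)))
      (fun p => p.1) (fun p => p.2) false

-- Source B _TRANSFORMS, in the same order
def pvTransforms : List ((Int × Int) → (Int × Int)) :=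
  [fun p => (p.1, p.2), fun p => (p.2, -p.1), fun p => (-p.1, -p.2), fun p => (-p.2, p.1),
   fun p => (p.1, -p.2), fun p => (-p.2, -p.1), fun p => (-p.1, p.2), fun p => (p.2, p.1)]

def get_all_orientations_alt (shape : List String) : List (List (Int × Int)) :=
  let base := pyB_normalize
    ((PySem.List.enumerate shape).flatMap (fun rc =>
      ((PySem.List.enumerate rc.2.toList).filter (fun cc => cc.2 == '#')).map
        (fun cc => (rc.1, cc.1))))
  pvTransforms.foldl (fun s t => PySem.Set.add s (pyB_normalize (base.map t))) PySem.Set.empty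

-- ===== PRECONDITION & SPEC =====
def Spec_get_all_orientations (shape : List String) (out : List (List (Int × Int))) : Prop := out = get_all_orientations_alt shape
instance (shape : List String) (out : List (List (Int × Int))) : Decidable (Spec_get_all_orientations shape out) := by unfold Spec_get_all_orientations; infer_instance

-- ===== CLAIM (what is proved, stated in full; the proofs are below) =====
def Claim_equal_get_all_orientations : Prop := ∀ (shape : List String), Dom_get_all_orientations shape → Spec_get_all_orientations shape (get_all_orientations shape)

-- ===== LEMMAS AND PROOFS =====

lemma pyB_nrm_eq : pyB_normalize = normalize_coords := rfl

lemma coords_eq (shape : List String) :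
    get_shape_coords shape =
      (PySem.List.enumerate shape).flatMap (fun rc =>
        ((PySem.List.enumerate rc.2.toList).filter (fun cc => cc.2 == '#')).map
          (fun cc => (rc.1, cc.1))) := by
  unfold get_shape_coords
  simp only [PySem.List.foldl_append_if, PySem.List.foldl_append_eq_flatMap, List.nil_append]

-- Python's tuple sort is the lexicographic sort: sorted2 on the components = sorted by the Lex key
lemma sorted2_eq_lex (xs : List (Int × Int)) :
    PySem.List.sorted2 xs (fun p => p.1) (fun p => p.2) false
      = PySem.List.sorted xs (fun p => toLex p) false := by
  simp only [PySem.List.sorted2, PySem.List.sorted, Bool.false_eq_true, if_false]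
  suffices h : (fun a b : Int × Int =>
      decide (a.1 < b.1) || (!decide (b.1 < a.1) && decide (a.2 < b.2)))
      = (fun a b : Int × Int => decide (toLex a < toLex b)) by rw [h]
  funext a b
  rw [Bool.eq_iff_iff]
  simp only [Bool.or_eq_true, Bool.and_eq_true, Bool.not_eq_true', decide_eq_true_eq,
    decide_eq_false_iff_not, Prod.Lex.lt_iff, ofLex_toLex]
  omega

lemma min?_id_eq_some (xs : List Int) (m : Int) (hm : m ∈ xs) (hle : ∀ y ∈ xs, m ≤ y) :
    PySem.List.min? xs (fun x => x) = some m := by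
  cases hx : PySem.List.min? xs (fun x => x) with
  | none =>
      rw [PySem.List.min?_eq_none_iff] at hx
      subst hx; cases hm
  | some m' =>
      have h1 : m' ≤ m := PySem.List.min?_isMin hx m hm
      have h2 : m ≤ m' := hle m' (PySem.List.min?_mem hx)
      rw [le_antisymm h1 h2]

lemma nrm_eq (X : List (Int × Int)) (hX : X ≠ []) :
    normalize_coords X =
      PySem.List.sorted2
        (X.map (fun p => (p.1 - (PySem.List.min? (X.map (fun p => p.1)) (fun x => x)).getD 0,
                          p.2 - (PySem.List.min? (X.map (fun p => p.2)) (fun x => x)).getD 0)))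
        (fun p => p.1) (fun p => p.2) false := by
  unfold normalize_coords; rw [if_neg hX]

lemma min?_map_perm (f : Int × Int → Int) {X Y : List (Int × Int)} (h : X.Perm Y) (hX : X ≠ []) :
    PySem.List.min? (X.map f) (fun x => x) = PySem.List.min? (Y.map f) (fun x => x) := by
  cases hx : PySem.List.min? (X.map f) (fun x => x) with
  | none =>
      rw [PySem.List.min?_eq_none_iff, List.map_eq_nil_iff] at hx
      exact absurd hx hX
  | some m =>
      symm
      apply min?_id_eq_some
      · exact (h.map f).mem_iff.mp (PySem.List.min?_mem hx)
      · intro y hy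
        exact PySem.List.min?_isMin hx y ((h.map f).mem_iff.mpr hy)

lemma normalize_perm {X Y : List (Int × Int)} (h : X.Perm Y) :
    normalize_coords X = normalize_coords Y := by
  by_cases hX : X = []
  · subst hX
    rw [h.nil_eq]
  · have hY : Y ≠ [] := fun hy => hX (by simpa [hy] using h)
    rw [nrm_eq X hX, nrm_eq Y hY,
        min?_map_perm (fun p => p.1) h hX, min?_map_perm (fun p => p.2) h hX,
        sorted2_eq_lex, sorted2_eq_lex]
    exact PySem.List.sorted_eq_sorted_of_perm _ _ _ (fun a b hab => by
        simpa using congrArg (fun x => ofLex x) hab)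
      (h.map _)

lemma normalize_map_sub (w1 w2 : Int) (X : List (Int × Int)) :
    normalize_coords (X.map (fun p => (p.1 - w1, p.2 - w2))) = normalize_coords X := by
  by_cases hX : X = []
  · subst hX; rfl
  · have hX' : X.map (fun p : Int × Int => (p.1 - w1, p.2 - w2)) ≠ [] := by
      simpa [List.map_eq_nil_iff] using hX
    -- the min of the first components of X
    obtain ⟨mr, hmr⟩ : ∃ m, PySem.List.min? (X.map (fun p => p.1)) (fun x => x) = some m := by
      cases hx : PySem.List.min? (X.map (fun p => p.1)) (fun x => x) with
      | none => rw [PySem.List.min?_eq_none_iff, List.map_eq_nil_iff] at hx; exact absurd hx hX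
      | some m => exact ⟨m, rfl⟩
    obtain ⟨mc, hmc⟩ : ∃ m, PySem.List.min? (X.map (fun p => p.2)) (fun x => x) = some m := by
      cases hx : PySem.List.min? (X.map (fun p => p.2)) (fun x => x) with
      | none => rw [PySem.List.min?_eq_none_iff, List.map_eq_nil_iff] at hx; exact absurd hx hX
      | some m => exact ⟨m, rfl⟩
    have h1 : PySem.List.min?
        ((X.map (fun p : Int × Int => (p.1 - w1, p.2 - w2))).map (fun p => p.1)) (fun x => x)
        = some (mr - w1) := by
      rw [List.map_map]
      apply min?_id_eq_some
      · obtain ⟨p, hp, hpe⟩ := List.mem_map.mp (PySem.List.min?_mem hmr)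
        exact List.mem_map.mpr ⟨p, hp, by simp [Function.comp]; omega⟩
      · intro y hy
        obtain ⟨p, hp, hpe⟩ := List.mem_map.mp hy
        have := PySem.List.min?_isMin hmr p.1 (List.mem_map.mpr ⟨p, hp, rfl⟩)
        simp [Function.comp] at hpe ⊢
        omega
    have h2 : PySem.List.min?
        ((X.map (fun p : Int × Int => (p.1 - w1, p.2 - w2))).map (fun p => p.2)) (fun x => x)
        = some (mc - w2) := by
      rw [List.map_map]
      apply min?_id_eq_some
      · obtain ⟨p, hp, hpe⟩ := List.mem_map.mp (PySem.List.min?_mem hmc)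
        exact List.mem_map.mpr ⟨p, hp, by simp [Function.comp]; omega⟩
      · intro y hy
        obtain ⟨p, hp, hpe⟩ := List.mem_map.mp hy
        have := PySem.List.min?_isMin hmc p.2 (List.mem_map.mpr ⟨p, hp, rfl⟩)
        simp [Function.comp] at hpe ⊢
        omega
    rw [nrm_eq _ hX', nrm_eq X hX, h1, h2, hmr, hmc, List.map_map]
    congr 1
    refine List.map_congr_left fun p _ => ?_
    simp [Function.comp]

-- the key structural lemma: normalization may be dropped before a linear transform
lemma normalize_map_normalize (f : Int × Int → Int × Int)
    (hf : ∀ p q : Int × Int, f (p.1 - q.1, p.2 - q.2) = ((f p).1 - (f q).1, (f p).2 - (f q).2))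
    (X : List (Int × Int)) :
    normalize_coords ((normalize_coords X).map f) = normalize_coords (X.map f) := by
  by_cases hX : X = []
  · subst hX; rfl
  · set mr := (PySem.List.min? (X.map (fun p => p.1)) (fun x => x)).getD 0 with hmr
    set mc := (PySem.List.min? (X.map (fun p => p.2)) (fun x => x)).getD 0 with hmc
    have hperm : (normalize_coords X).Perm
        (X.map (fun p => (p.1 - mr, p.2 - mc))) := by
      rw [nrm_eq X hX]
      exact PySem.List.sorted2_perm _ _ _ _
    calc normalize_coords ((normalize_coords X).map f)
        = normalize_coords ((X.map (fun p => (p.1 - mr, p.2 - mc))).map f) :=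
          normalize_perm (hperm.map f)
      _ = normalize_coords ((X.map f).map
            (fun q => (q.1 - (f (mr, mc)).1, q.2 - (f (mr, mc)).2))) := by
          rw [List.map_map, List.map_map]
          congr 1
          refine List.map_congr_left fun p _ => ?_
          simpa [Function.comp] using hf p (mr, mc)
      _ = normalize_coords (X.map f) := normalize_map_sub _ _ _

lemma rot_step (X : List (Int × Int)) :
    rotate_90 (normalize_coords X) = normalize_coords (X.map (fun p => (p.2, -p.1))) := by
  unfold rotate_90
  exact normalize_map_normalize _ (fun p q => by simp [Prod.mk.injEq]; omega) X

lemma nrm_idem (X : List (Int × Int)) :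
    normalize_coords (normalize_coords X) = normalize_coords X := by
  have h := normalize_map_normalize (fun p => (p.1, p.2))
    (fun p q => by simp) X
  simpa using h

lemma map_step (base : List (Int × Int)) (g h : (Int × Int) → (Int × Int))
    (hgh : ∀ p : Int × Int, ((g p).2, -(g p).1) = h p) :
    rotate_90 (normalize_coords (base.map g)) = normalize_coords (base.map h) := by
  rw [rot_step, List.map_map]
  congr 1
  refine List.map_congr_left fun p _ => ?_
  simpa [Function.comp] using hgh p

-- ===== VERDICT (by name: the statement is the Claim_ definition above) =====
theorem get_all_orientations_spec : Claim_equal_get_all_orientations := by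
  intro shape _
  unfold Spec_get_all_orientations
  unfold get_all_orientations get_all_orientations_alt pvTransforms
  rw [pyB_nrm_eq, ← coords_eq shape]
  have hR : PySem.List.pyRange 0 4 1 = [0, 1, 2, 3] := by decide
  simp only [hR, List.foldl]
  set base := normalize_coords (get_shape_coords shape) with hbase
  have h2 : rotate_90 base = normalize_coords (base.map (fun p => (p.2, -p.1))) := rfl
  have h3 : rotate_90 (normalize_coords (base.map (fun p : Int × Int => (p.2, -p.1))))
      = normalize_coords (base.map (fun p => (-p.1, -p.2))) :=
    map_step base _ _ (fun p => by simp)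
  have h4 : rotate_90 (normalize_coords (base.map (fun p : Int × Int => (-p.1, -p.2))))
      = normalize_coords (base.map (fun p => (-p.2, p.1))) :=
    map_step base _ _ (fun p => by simp)
  have h5 : flip_horizontal base = normalize_coords (base.map (fun p => (p.1, -p.2))) := rfl
  have h6 : rotate_90 (normalize_coords (base.map (fun p : Int × Int => (p.1, -p.2))))
      = normalize_coords (base.map (fun p => (-p.2, -p.1))) :=
    map_step base _ _ (fun p => by simp)
  have h7 : rotate_90 (normalize_coords (base.map (fun p : Int × Int => (-p.2, -p.1))))
      = normalize_coords (base.map (fun p => (-p.1, p.2))) :=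
    map_step base _ _ (fun p => by simp)
  have h8 : rotate_90 (normalize_coords (base.map (fun p : Int × Int => (-p.1, p.2))))
      = normalize_coords (base.map (fun p => (p.2, p.1))) :=
    map_step base _ _ (fun p => by simp)
  have hb1 : normalize_coords (base.map (fun p : Int × Int => (p.1, p.2))) = base := by
    rw [show base.map (fun p : Int × Int => (p.1, p.2)) = base by simp, hbase]
    exact nrm_idem _
  rw [h2, h3, h4, h5, h6, h7, h8, hb1]
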